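-- pv_equiv track=rewrite | github.com/sethipriyanshu/detchamber | engines/profiler/detector.py | _infer_input_kind
-- ===== SOURCE A (Python) =====
-- from typing import List
--
-- def _infer_input_kind(param_names: List[str]) -> str:
--     lowered = [p.lower() for p in param_names]
--     if any(name in ("items", "arr", "array", "data", "numbers", "values") for name in lowered):
--         return "list"
--     if any(name in ("text", "s", "string", "line") for name in lowered):
--         return "string"
--     if any(name in ("mapping", "d", "dict", "mapping") for name in lowered):
--         return "dict"
--     return "list" if lowered else "int"
-- ===== SOURCE B (Python) =====
-- from typing import List
--
-- _CATEGORY = {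
--     "items": "list", "arr": "list", "array": "list", "data": "list",
--     "numbers": "list", "values": "list",
--     "text": "string", "s": "string", "string": "string", "line": "string",
--     "mapping": "dict", "d": "dict", "dict": "dict",
-- }
--
-- def _infer_input_kind(param_names: List[str]) -> str:
--     found = set()
--     for p in param_names:
--         c = _CATEGORY.get(p.lower())
--         if c is not None:
--             found.add(c)
--     if "list" in found:
--         return "list"
--     if "string" in found:
--         return "string"
--     if "dict" in found:
--         return "dict"
--     return "list" if param_names else "int"
-- ===== Notes on version B (the rewrite author's own statement) =====
-- stated objective: simpler
-- what changed: Replaced A's three separate any()-scans over the lowered list with a single classifying pass that records via a name-to-category dict which categories occur, then resolves by the fixed list>string>dict priority with the same empty->'int' fallback.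
import Mathlib
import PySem

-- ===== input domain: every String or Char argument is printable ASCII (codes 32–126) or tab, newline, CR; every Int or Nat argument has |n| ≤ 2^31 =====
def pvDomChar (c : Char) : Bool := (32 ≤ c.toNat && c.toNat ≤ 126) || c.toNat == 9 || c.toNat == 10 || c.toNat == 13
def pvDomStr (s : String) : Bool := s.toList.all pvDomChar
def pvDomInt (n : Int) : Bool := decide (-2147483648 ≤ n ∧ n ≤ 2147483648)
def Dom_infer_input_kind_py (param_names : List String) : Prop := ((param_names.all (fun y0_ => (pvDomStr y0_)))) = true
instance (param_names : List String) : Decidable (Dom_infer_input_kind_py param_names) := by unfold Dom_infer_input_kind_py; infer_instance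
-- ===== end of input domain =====

-- B replaces A's three any()-scans with one classifying pass plus a fixed priority decision (objective: simpler).

-- ===== PORT A =====
def infer_input_kind_py (param_names : List String) : String :=
  let lowered := param_names.map PySem.Str.lower
  if lowered.any (fun name => name == "items" || name == "arr" || name == "array" ||
      name == "data" || name == "numbers" || name == "values") then "list"
  else if lowered.any (fun name => name == "text" || name == "s" || name == "string" ||
      name == "line") then "string"
  else if lowered.any (fun name => name == "mapping" || name == "d" || name == "dict" ||
      name == "mapping") then "dict"
  else if lowered.isEmpty then "int" else "list"

-- ===== PORT B =====
-- the name→category lookup table (Python's _CATEGORY.get)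
def pvCategory (name : String) : Option String :=
  if name == "items" || name == "arr" || name == "array" || name == "data" ||
     name == "numbers" || name == "values" then some "list"
  else if name == "text" || name == "s" || name == "string" || name == "line" then some "string"
  else if name == "mapping" || name == "d" || name == "dict" then some "dict"
  else none

def infer_input_kind_py_alt (param_names : List String) : String :=
  -- one pass: record which categories occur (the 'found' set, as three flags)
  let found := param_names.foldl
    (fun (f : Bool × Bool × Bool) p =>
      let c := pvCategory (PySem.Str.lower p)
      (f.1 || (c == some "list"), f.2.1 || (c == some "string"), f.2.2 || (c == some "dict")))
    (false, false, false)
  if found.1 then "list"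
  else if found.2.1 then "string"
  else if found.2.2 then "dict"
  else if param_names.isEmpty then "int" else "list"

-- ===== PRECONDITION & SPEC =====
def Spec_infer_input_kind_py (param_names : List String) (out : String) : Prop := out = infer_input_kind_py_alt param_names
instance (param_names : List String) (out : String) : Decidable (Spec_infer_input_kind_py param_names out) := by unfold Spec_infer_input_kind_py; infer_instance

-- ===== CLAIM (what is proved, stated in full; the proofs are below) =====
def Claim_equal_infer_input_kind_py : Prop := ∀ (param_names : List String), Dom_infer_input_kind_py param_names → Spec_infer_input_kind_py param_names (infer_input_kind_py param_names)

-- ===== LEMMAS AND PROOFS =====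

theorem pvCat_list (name : String) :
    (pvCategory name == some "list") =
      (name == "items" || name == "arr" || name == "array" || name == "data" ||
       name == "numbers" || name == "values") := by
  unfold pvCategory; split_ifs with h1 h2 h3 <;> simp_all

theorem pvCat_string (name : String) :
    (pvCategory name == some "string") =
      (name == "text" || name == "s" || name == "string" || name == "line") := by
  unfold pvCategory; split_ifs with h1 h2 h3 <;> simp_all
  rcases h1 with ((((rfl|rfl)|rfl)|rfl)|rfl)|rfl <;> decide

theorem pvCat_dict (name : String) :
    (pvCategory name == some "dict") =
      (name == "mapping" || name == "d" || name == "dict" || name == "mapping") := by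
  unfold pvCategory; split_ifs with h1 h2 h3 <;> simp_all
  · rcases h1 with ((((rfl|rfl)|rfl)|rfl)|rfl)|rfl <;> decide
  · rcases h2 with ((rfl|rfl)|rfl)|rfl <;> decide

theorem pvFold_flags (l : List String) (a b c : Bool) :
    l.foldl
      (fun (f : Bool × Bool × Bool) p =>
        let cc := pvCategory (PySem.Str.lower p)
        (f.1 || (cc == some "list"), f.2.1 || (cc == some "string"), f.2.2 || (cc == some "dict")))
      (a, b, c) =
    (a || l.any (fun p => pvCategory (PySem.Str.lower p) == some "list"),
     b || l.any (fun p => pvCategory (PySem.Str.lower p) == some "string"),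
     c || l.any (fun p => pvCategory (PySem.Str.lower p) == some "dict")) := by
  induction l generalizing a b c with
  | nil => simp
  | cons x xs ih => simp [List.foldl, ih, Bool.or_assoc]

-- ===== VERDICT (by name: the statement is the Claim_ definition above) =====
theorem infer_input_kind_py_spec : Claim_equal_infer_input_kind_py := by
  intro l _
  show infer_input_kind_py l = infer_input_kind_py_alt l
  unfold infer_input_kind_py infer_input_kind_py_alt
  simp only [pvFold_flags]
  simp only [Bool.false_or, List.any_map, List.isEmpty_map, Function.comp_def,
    pvCat_list, pvCat_string, pvCat_dict]
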